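-- pv_equiv track=rewrite | github.com/PirvuDanielCatalin/Faculty_Playgroung | Python/Operations-on-rare-matrices/MatriciRare_RO.py | restructMatrix
-- ===== SOURCE A (Python) =====
-- def restructMatrix(Mat):
--     reMat = []  # Matricea transpusa
--     for lista in Mat:  # Pentru fiecare lista de tip linie (vector de tuple)
--         for element in lista:  # Pentru fiecare tuplu din lista
--             coloana = element[2]  # Preiau coloana din tuplu
--             # Preiau lungimea actuala a matricii transpuse = nr de coloane facute pana in prezent
--             # len([]) = 0
--             l = len(reMat)
--
--             # Cautam pozitia in matricea transpusa reMat a listei de tip coloana corespunzatoare,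
--             # adica lista care are doar tuple ce au a treia componenta egala cu variabila coloana
--             i = 0
--             ok = 0
--             while i < l:
--                 ok = 1
--                 if reMat[i][0][2] == coloana:
--                     # Daca am gasit o lista de tip coloana care respecta ce e scris mai sus, ma opresc,
--                     # astfel cand ies din while i va fi indicele in matricea transpusa reMat
--                     # a listei de tip coloana unde va fi inserat noul element
--                     break
--                 else:
--                     # Daca nu respecta mergem mai departe pana cand verificam toate listele de tip coloana
--                     # existente pana in pasul curent in reMat
--                     i += 1
--
--             # Daca i=0 inseamna ca nu ai intrat in while si chestia asta se poate intampla
--             # doar la primul element(tuplu) citit din Mat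
--             # Daca i=l inseamna ca a iesit din while si nu a gasit inca o lista tip coloana
--             # corespunzatoare celui de-al 3-lea camp din element(tuplu)
--             if ok == 0 or i == l:  # Nu exista inca in lista reMat o lista corespunzatoare coloanei "coloana"
--                 temp = []  # Se face o noua lista de tip coloana
--                 # Elementul(tuplu) se insereaza in lista mai sus creata
--                 temp.append(element)
--                 # Intreaga lista se insereaza in matricea transpusa reMat
--                 reMat.append(temp)
--             else:
--                 # Daca i e undeva la mijloc elementul(tuplul) se insereaza in lista de tip coloana
--                 # de la pozitia i in matricea transpusa
--                 reMat[i].append(element)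
--
--     reMat = sorted(reMat, key=lambda x: x[0][2])
--     # Sortez lista de liste de tip coloana dupa coloane
--     # adica din fiecare lista interioara iau primu element si vad a treia componeneta din tuplu
--     return reMat
-- ===== SOURCE B (Python) =====
-- def restructMatrix(Mat):
--     # Stable-sort the flattened elements by their 3rd component, then split the
--     # sorted list into consecutive runs of equal 3rd component: no group container,
--     # the grouping falls out of the sort order.
--     flat = sorted((e for row in Mat for e in row), key=lambda e: e[2])
--     out = []
--     i, n = 0, len(flat)
--     while i < n:
--         j = i + 1
--         while j < n and flat[j][2] == flat[i][2]:
--             j += 1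
--         out.append(flat[i:j])
--         i = j
--     return out
-- ===== Notes on version B (the rewrite author's own statement) =====
-- stated objective: faster
-- what changed: A builds column groups incrementally, scanning the existing groups linearly for every element and sorting the groups at the end; B never maintains groups at all: it stable-sorts the flattened elements by the 3rd component once and then splits the sorted list into consecutive equal-key runs.
import Mathlib
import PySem

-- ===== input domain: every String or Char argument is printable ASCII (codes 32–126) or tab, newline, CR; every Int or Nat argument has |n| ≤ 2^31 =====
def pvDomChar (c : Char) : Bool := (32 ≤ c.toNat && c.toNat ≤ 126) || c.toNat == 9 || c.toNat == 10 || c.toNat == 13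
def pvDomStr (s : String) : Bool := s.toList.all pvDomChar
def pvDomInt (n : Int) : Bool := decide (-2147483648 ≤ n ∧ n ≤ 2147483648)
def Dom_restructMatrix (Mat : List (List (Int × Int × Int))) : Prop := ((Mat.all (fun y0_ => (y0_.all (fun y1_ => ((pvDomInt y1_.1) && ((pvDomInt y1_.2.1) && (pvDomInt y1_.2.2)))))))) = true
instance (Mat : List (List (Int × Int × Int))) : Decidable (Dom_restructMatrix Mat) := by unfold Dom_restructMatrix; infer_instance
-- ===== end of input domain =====

-- B keeps no group container at all: it stable-sorts the flattened elements by the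
-- 3rd component once and splits the sorted list into consecutive equal-key runs
-- (objective: a different algorithm; a timing run measured B faster).

-- ===== PORT A =====
-- A's while-scan + append: walk the column lists, append the element to the first
-- list whose head has the same 3rd component, else append a new singleton list.
-- Python's reMat[i][0] is rendered with headD (0,0,0); every list in reMat is
-- nonempty in A, so the default is never read.
def restructInsert (e : Int × Int × Int) : List (List (Int × Int × Int)) → List (List (Int × Int × Int))
  | [] => [[e]]
  | g :: rest =>
    if (g.headD (0, 0, 0)).2.2 == e.2.2 then (g ++ [e]) :: rest
    else g :: restructInsert e rest

def restructMatrix (Mat : List (List (Int × Int × Int))) : List (List (Int × Int × Int)) :=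
  let reMat := Mat.foldl (fun reMat lista => lista.foldl (fun r e => restructInsert e r) reMat) []
  PySem.List.sorted reMat (fun x => (x.headD (0, 0, 0)).2.2) false

-- ===== PORT B =====
-- B's outer while loop advances i run by run; ported as structural recursion on the
-- suffix: the inner while computing j is the takeWhile/dropWhile split of the tail.
def pvRuns : List (Int × Int × Int) → List (List (Int × Int × Int))
  | [] => []
  | x :: t =>
    (x :: t.takeWhile (fun y => y.2.2 == x.2.2)) :: pvRuns (t.dropWhile (fun y => y.2.2 == x.2.2))
termination_by xs => xs.length
decreasing_by
  simp only [List.length_cons]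
  exact Nat.lt_succ_of_le (List.length_dropWhile_le _ _)

def restructMatrix_alt (Mat : List (List (Int × Int × Int))) : List (List (Int × Int × Int)) :=
  pvRuns (PySem.List.sorted Mat.flatten (fun e => e.2.2) false)

-- ===== PRECONDITION & SPEC =====
def Spec_restructMatrix (Mat : List (List (Int × Int × Int))) (out : List (List (Int × Int × Int))) : Prop := out = restructMatrix_alt Mat
instance (Mat : List (List (Int × Int × Int))) (out : List (List (Int × Int × Int))) : Decidable (Spec_restructMatrix Mat out) := by unfold Spec_restructMatrix; infer_instance

-- ===== CLAIM (what is proved, stated in full; the proofs are below) =====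
def Claim_equal_restructMatrix : Prop := ∀ (Mat : List (List (Int × Int × Int))), Dom_restructMatrix Mat → Spec_restructMatrix Mat (restructMatrix Mat)

-- ===== LEMMAS AND PROOFS =====

-- the group of key k collected from the list p
def pvGroup (p : List (Int × Int × Int)) (k : Int) : List (Int × Int × Int) :=
  p.filter (fun x => x.2.2 == k)

-- A's accumulator after processing p: one group per first-occurrence key
def pvG (p : List (Int × Int × Int)) : List (List (Int × Int × Int)) :=
  (PySem.Set.ofList (p.map (fun x => x.2.2))).map (pvGroup p)

-- the distinct keys of p in ascending order
def pvKeys (p : List (Int × Int × Int)) : List Int :=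
  PySem.List.sorted (PySem.Set.ofList (p.map (fun x => x.2.2))) (fun k => k) false

-- insert a key into a strictly increasing key list (no duplicate)
def insKey (k : Int) : List Int → List Int
  | [] => [k]
  | a :: t => if k < a then k :: a :: t else if k = a then a :: t else a :: insKey k t

lemma pvGroup_head (p : List (Int × Int × Int)) (k : Int)
    (hk : k ∈ p.map (fun x => x.2.2)) :
    ((pvGroup p k).headD (0, 0, 0)).2.2 = k := by
  have hne : pvGroup p k ≠ [] := by
    simp only [pvGroup, ne_eq, List.filter_eq_nil_iff]
    push Not
    obtain ⟨x, hx, hkx⟩ := List.mem_map.mp hk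
    exact ⟨x, hx, by simp [hkx]⟩
  obtain ⟨y, t, hyt⟩ := List.exists_cons_of_ne_nil hne
  have hy : y ∈ pvGroup p k := by rw [hyt]; exact List.mem_cons_self
  have := List.of_mem_filter hy
  simp only [beq_iff_eq] at this
  simp [hyt, this]

lemma pvGroup_ne_nil (p : List (Int × Int × Int)) (k : Int)
    (hk : k ∈ p.map (fun x => x.2.2)) : pvGroup p k ≠ [] := by
  simp only [pvGroup, ne_eq, List.filter_eq_nil_iff]
  push Not
  obtain ⟨x, hx, hkx⟩ := List.mem_map.mp hk
  exact ⟨x, hx, by simp [hkx]⟩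

lemma pvGroup_key (p : List (Int × Int × Int)) (k : Int) :
    ∀ y ∈ pvGroup p k, y.2.2 = k := by
  intro y hy
  have := List.of_mem_filter hy
  simpa using this

lemma restructInsert_map (ks : List Int) (f : Int → List (Int × Int × Int))
    (e : Int × Int × Int) (hnd : ks.Nodup)
    (hhead : ∀ k ∈ ks, ((f k).headD (0, 0, 0)).2.2 = k) :
    restructInsert e (ks.map f) =
      if e.2.2 ∈ ks then ks.map (fun k => f k ++ if e.2.2 == k then [e] else [])
      else ks.map f ++ [[e]] := by
  induction ks with
  | nil => simp [restructInsert]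
  | cons k t ih =>
    have hk : ((f k).headD (0, 0, 0)).2.2 = k := hhead k (by simp)
    rw [List.map_cons, restructInsert, hk]
    by_cases hke : e.2.2 = k
    · have hnt : e.2.2 ∉ t := by rw [hke]; exact (List.nodup_cons.mp hnd).1
      simp only [hke, beq_self_eq_true, List.mem_cons, true_or, if_pos]
      rw [List.map_cons]
      congr 1
      · simp
      · refine (List.map_congr_left ?_).symm
        intro a ha
        have hka : ¬ k = a := fun h => hnt (by rw [hke, h]; exact ha)
        simp [hka]
    · have hcond : (k == e.2.2) = false := by simp [Ne.symm hke]
      simp only [hcond, Bool.false_eq_true, if_false]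
      rw [ih (List.nodup_cons.mp hnd).2 (fun a ha => hhead a (List.mem_cons_of_mem _ ha))]
      have hmem : (e.2.2 ∈ k :: t) ↔ (e.2.2 ∈ t) := by simp [hke]
      by_cases hm : e.2.2 ∈ t
      · simp only [hm, if_true, hmem.mpr hm, List.map_cons]
        congr 1
        simp [beq_eq_false_iff_ne.mpr hke]
      · simp [hm, hke]

lemma pvGroup_append (p : List (Int × Int × Int)) (e : Int × Int × Int) (k : Int) :
    pvGroup (p ++ [e]) k = pvGroup p k ++ if e.2.2 == k then [e] else [] := by
  simp only [pvGroup, List.filter_append, List.filter_cons, List.filter_nil]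

lemma pvG_step (p : List (Int × Int × Int)) (e : Int × Int × Int) :
    restructInsert e (pvG p) = pvG (p ++ [e]) := by
  have hnd : (PySem.Set.ofList (p.map (fun x => x.2.2))).Nodup := PySem.Set.nodup_ofList _
  have hhead : ∀ k ∈ PySem.Set.ofList (p.map (fun x => x.2.2)),
      ((pvGroup p k).headD (0, 0, 0)).2.2 = k := by
    intro k hk
    exact pvGroup_head p k ((PySem.Set.mem_ofList _ _).mp hk)
  rw [pvG, restructInsert_map _ _ _ hnd hhead]
  have hkeys : PySem.Set.ofList ((p ++ [e]).map (fun x => x.2.2)) =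
      PySem.Set.add (PySem.Set.ofList (p.map (fun x => x.2.2))) e.2.2 := by
    rw [List.map_append]
    simp [PySem.Set.ofList_append_singleton]
  by_cases hm : e.2.2 ∈ PySem.Set.ofList (p.map (fun x => x.2.2))
  · rw [if_pos hm, pvG, hkeys, PySem.Set.add_of_mem hm]
    exact (List.map_congr_left (fun k _ => by rw [pvGroup_append])).symm
  · rw [if_neg hm, pvG, hkeys, PySem.Set.add_of_not_mem hm, List.map_append]
    congr 1
    · refine (List.map_congr_left ?_).symm
      intro k hk
      rw [pvGroup_append]
      have hne : ¬ e.2.2 = k := fun h => hm (h ▸ hk)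
      simp [hne]
    · have hemp : pvGroup p e.2.2 = [] := by
        rw [pvGroup, List.filter_eq_nil_iff]
        intro x hx
        simp only [beq_iff_eq]
        intro h
        exact hm ((PySem.Set.mem_ofList _ _).mpr (List.mem_map.mpr ⟨x, hx, h⟩))
      simp [pvGroup_append, hemp]

lemma pvG_foldl (l p : List (Int × Int × Int)) :
    l.foldl (fun r e => restructInsert e r) (pvG p) = pvG (p ++ l) := by
  induction l generalizing p with
  | nil => simp
  | cons e t ih => simpa [pvG_step] using (ih (p ++ [e])).trans (by simp)

lemma sorted_pvG (p : List (Int × Int × Int)) :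
    PySem.List.sorted (pvG p) (fun x => (x.headD (0, 0, 0)).2.2) false =
      (pvKeys p).map (pvGroup p) := by
  have hndks : (PySem.Set.ofList (p.map (fun x => x.2.2))).Nodup := PySem.Set.nodup_ofList _
  have hperm : (pvKeys p).Perm (PySem.Set.ofList (p.map (fun x => x.2.2))) :=
    PySem.List.sorted_perm _ _ _
  have hnds : (pvKeys p).Nodup := hperm.nodup_iff.mpr hndks
  have hle : (pvKeys p).Pairwise (· ≤ ·) := PySem.List.sorted_pairwise _ _
  have hlt : (pvKeys p).Pairwise (· < ·) :=
    (hle.and hnds).imp (fun h => lt_of_le_of_ne h.1 h.2)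
  refine PySem.List.sorted_eq_of_perm_of_pairwise_lt _ _ _ (hperm.map _) ?_
  rw [List.pairwise_map]
  refine hlt.imp_of_mem ?_
  intro a b ha hb hab
  have hka : ((pvGroup p a).headD (0, 0, 0)).2.2 = a :=
    pvGroup_head p a ((PySem.Set.mem_ofList _ _).mp ((PySem.List.mem_sorted _ _ _ _).mp ha))
  have hkb : ((pvGroup p b).headD (0, 0, 0)).2.2 = b :=
    pvGroup_head p b ((PySem.Set.mem_ofList _ _).mp ((PySem.List.mem_sorted _ _ _ _).mp hb))
  show ((pvGroup p a).headD (0, 0, 0)).2.2 < ((pvGroup p b).headD (0, 0, 0)).2.2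
  rw [hka, hkb]; exact hab

-- pvKeys facts
lemma pvKeys_pairwise_lt (p : List (Int × Int × Int)) : (pvKeys p).Pairwise (· < ·) :=
  PySem.List.sorted_ofList_pairwise_lt _

lemma mem_pvKeys (p : List (Int × Int × Int)) (k : Int) :
    k ∈ pvKeys p ↔ k ∈ p.map (fun x => x.2.2) := by
  rw [pvKeys, PySem.List.mem_sorted, PySem.Set.mem_ofList]

-- insKey facts
lemma mem_insKey (k x : Int) (ks : List Int) : x ∈ insKey k ks ↔ x = k ∨ x ∈ ks := by
  induction ks with
  | nil => simp [insKey]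
  | cons a t ih =>
    by_cases h1 : k < a
    · simp [insKey, h1]
    · by_cases h2 : k = a
      · subst h2
        rw [insKey, if_neg h1, if_pos rfl]
        simp only [List.mem_cons]
        tauto
      · simp [insKey, h1, h2, ih]; tauto

lemma insKey_pairwise_lt (k : Int) (ks : List Int) (hks : ks.Pairwise (· < ·)) :
    (insKey k ks).Pairwise (· < ·) := by
  induction ks with
  | nil => simp [insKey]
  | cons a t ih =>
    obtain ⟨ha, ht⟩ := List.pairwise_cons.mp hks
    by_cases h1 : k < a
    · rw [insKey, if_pos h1]
      exact List.pairwise_cons.mpr ⟨by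
        intro x hx
        rcases List.mem_cons.mp hx with h | h
        · omega
        · exact lt_trans h1 (ha x h), hks⟩
    · by_cases h2 : k = a
      · rw [insKey, if_neg h1, if_pos h2]; exact hks
      · rw [insKey, if_neg h1, if_neg h2]
        refine List.pairwise_cons.mpr ⟨?_, ih ht⟩
        intro x hx
        rcases (mem_insKey _ _ _).mp hx with h | h
        · omega
        · exact ha x h

lemma insKey_eq_of_mem (k : Int) (ks : List Int) (hks : ks.Pairwise (· < ·))
    (hm : k ∈ ks) : insKey k ks = ks := by
  induction ks with
  | nil => simp at hm
  | cons a t ih =>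
    obtain ⟨ha, ht⟩ := List.pairwise_cons.mp hks
    rcases List.mem_cons.mp hm with h | h
    · rw [insKey, if_neg (by omega), if_pos h]
    · have hak : a < k := ha k h
      rw [insKey, if_neg (by omega), if_neg (by omega), ih ht h]

lemma insKey_perm_of_not_mem (k : Int) (ks : List Int) (hm : k ∉ ks) :
    (insKey k ks).Perm (ks ++ [k]) := by
  induction ks with
  | nil => simp [insKey]
  | cons a t ih =>
    by_cases h1 : k < a
    · rw [insKey, if_pos h1]
      exact (List.perm_append_singleton _ _).symm
    · have h2 : k ≠ a := fun h => hm (h ▸ List.mem_cons_self)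
      rw [insKey, if_neg h1, if_neg h2]
      exact (ih (fun h => hm (List.mem_cons_of_mem _ h))).cons a

lemma pvKeys_append (p : List (Int × Int × Int)) (e : Int × Int × Int) :
    pvKeys (p ++ [e]) = insKey e.2.2 (pvKeys p) := by
  have hkeys : PySem.Set.ofList ((p ++ [e]).map (fun x => x.2.2)) =
      PySem.Set.add (PySem.Set.ofList (p.map (fun x => x.2.2))) e.2.2 := by
    rw [List.map_append]
    simp [PySem.Set.ofList_append_singleton]
  have hperm : (pvKeys p).Perm (PySem.Set.ofList (p.map (fun x => x.2.2))) :=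
    PySem.List.sorted_perm _ _ _
  by_cases hm : e.2.2 ∈ pvKeys p
  · have hmS : e.2.2 ∈ PySem.Set.ofList (p.map (fun x => x.2.2)) := hperm.mem_iff.mp hm
    rw [insKey_eq_of_mem _ _ (pvKeys_pairwise_lt p) hm, pvKeys, hkeys,
      PySem.Set.add_of_mem hmS]
    rfl
  · have hmS : e.2.2 ∉ PySem.Set.ofList (p.map (fun x => x.2.2)) :=
      fun h => hm (hperm.mem_iff.mpr h)
    rw [pvKeys, hkeys, PySem.Set.add_of_not_mem hmS]
    refine PySem.List.sorted_eq_of_perm_of_pairwise_lt _ _ _ ?_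
      (insKey_pairwise_lt _ _ (pvKeys_pairwise_lt p))
    exact (insKey_perm_of_not_mem _ _ hm).trans (hperm.append_right [e.2.2])

-- insertBy skips a prefix it does not go before
lemma insertBy_skip (before : (Int × Int × Int) → (Int × Int × Int) → Bool)
    (x : Int × Int × Int) (as bs : List (Int × Int × Int))
    (h : ∀ y ∈ as, before x y = false) :
    PySem.List.insertBy before x (as ++ bs) = as ++ PySem.List.insertBy before x bs := by
  induction as with
  | nil => simp
  | cons y t ih =>
    have hy : before x y = false := h y List.mem_cons_self
    rw [List.cons_append, PySem.List.insertBy]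
    simp only [hy, Bool.false_eq_true, if_false]
    rw [ih (fun z hz => h z (List.mem_cons_of_mem _ hz))]
    rfl

-- inserting e into a concatenation of strictly-increasing-keyed groups appends it
-- at the end of its own group (or creates it at the right place)
lemma insertBy_flatMap (e : Int × Int × Int) (ks : List Int)
    (g : Int → List (Int × Int × Int)) (hks : ks.Pairwise (· < ·))
    (hkey : ∀ k ∈ ks, ∀ y ∈ g k, y.2.2 = k)
    (hne : ∀ k ∈ ks, g k ≠ [])
    (hout : e.2.2 ∉ ks → g e.2.2 = []) :
    PySem.List.insertBy (fun a b => decide (a.2.2 < b.2.2)) e (ks.flatMap g) =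
      (insKey e.2.2 ks).flatMap (fun k => g k ++ if e.2.2 == k then [e] else []) := by
  induction ks with
  | nil =>
    simp only [List.flatMap_nil, insKey, List.flatMap_cons, List.flatMap_nil]
    rw [PySem.List.insertBy]
    simp [hout (by simp)]
  | cons a t ih =>
    obtain ⟨hat, ht⟩ := List.pairwise_cons.mp hks
    have hga : g a ≠ [] := hne a List.mem_cons_self
    obtain ⟨y0, ys, hgay⟩ := List.exists_cons_of_ne_nil hga
    have hy0 : y0.2.2 = a := hkey a List.mem_cons_self y0 (by rw [hgay]; exact List.mem_cons_self)
    by_cases h1 : e.2.2 < a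
    · -- e goes in front as a new singleton group
      have hnm : e.2.2 ∉ a :: t := by
        intro h
        rcases List.mem_cons.mp h with h | h
        · omega
        · have := hat _ h; omega
      rw [List.flatMap_cons, hgay, List.cons_append, PySem.List.insertBy]
      simp only [hy0, h1, decide_true, if_true]
      rw [insKey, if_pos h1]
      simp only [List.flatMap_cons]
      have hge : g e.2.2 = [] := hout hnm
      rw [hge]
      have hrest : ∀ k ∈ a :: t, (g k ++ if e.2.2 == k then [e] else []) = g k := by
        intro k hk
        have : ¬ e.2.2 = k := fun h => hnm (h ▸ hk)
        simp [this]
      have hta : (e.2.2 == a) = false := by simp; omega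
      have htT : List.flatMap (fun k => g k ++ if e.2.2 == k then [e] else []) t =
          List.flatMap g t :=
        List.flatMap_congr (fun k hk => hrest k (List.mem_cons_of_mem _ hk))
      rw [htT, hta]
      simp [hgay]
    · by_cases h2 : e.2.2 = a
      · -- e appended at the end of group a
        have hnt : e.2.2 ∉ t := by
          intro h; have := hat _ h; omega
        rw [List.flatMap_cons, insertBy_skip _ _ _ _ ?_, insKey, if_neg h1, if_pos h2,
          List.flatMap_cons]
        · have hEa : (e.2.2 == a) = true := by simp [h2]
          have hT : List.flatMap (fun k => g k ++ if e.2.2 == k then [e] else []) t =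
              List.flatMap g t :=
            List.flatMap_congr (fun k hk => by
              have : ¬ e.2.2 = k := fun h => hnt (h ▸ hk)
              simp [this])
          simp only [hEa, if_true, hT, List.append_assoc]
          congr 1
          cases hflat : t.flatMap g with
          | nil =>
            rw [PySem.List.insertBy]
            simp
          | cons z zs =>
            have hz : z ∈ t.flatMap g := by rw [hflat]; exact List.mem_cons_self
            obtain ⟨b, hbm, hzb⟩ := List.mem_flatMap.mp hz
            have hzk := hkey b (List.mem_cons_of_mem _ hbm) z hzb
            have hab := hat b hbm
            have hb : (decide (e.2.2 < z.2.2)) = true := by simp [hzk]; omega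
            rw [PySem.List.insertBy]
            simp only [hb, if_true]
            rfl
        · intro y hy
          have := hkey a List.mem_cons_self y hy
          simp [this, h2]
      · -- a < e.2.2 : skip group a and recurse
        have ha2 : a < e.2.2 := by omega
        rw [List.flatMap_cons, insertBy_skip _ _ _ _ ?_, insKey, if_neg h1, if_neg h2,
          List.flatMap_cons]
        · have hout' : e.2.2 ∉ t → g e.2.2 = [] := by
            intro h
            exact hout (by simp [h2, h])
          rw [ih ht (fun k hk => hkey k (List.mem_cons_of_mem _ hk))
            (fun k hk => hne k (List.mem_cons_of_mem _ hk)) hout']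
          have : ¬ e.2.2 = a := h2
          simp [this]
        · intro y hy
          have := hkey a List.mem_cons_self y hy
          simp [this]; omega

-- the stable sort of p by the 3rd component is the concatenation of the groups in
-- ascending key order
lemma sorted_flat (p : List (Int × Int × Int)) :
    PySem.List.sorted p (fun e => e.2.2) false = (pvKeys p).flatMap (pvGroup p) := by
  induction p using List.reverseRecOn with
  | nil => rfl
  | append_singleton p e ih =>
    have hstep : PySem.List.sorted (p ++ [e]) (fun e => e.2.2) false =
        PySem.List.insertBy (fun a b => decide (a.2.2 < b.2.2)) e
          (PySem.List.sorted p (fun e => e.2.2) false) := by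
      rw [PySem.List.sorted_eq_foldl_insertBy, PySem.List.sorted_eq_foldl_insertBy,
        List.foldl_append, List.foldl_cons, List.foldl_nil]
    have hout : e.2.2 ∉ pvKeys p → pvGroup p e.2.2 = [] := by
      intro h
      rw [pvGroup, List.filter_eq_nil_iff]
      intro x hx hb
      exact h ((mem_pvKeys p _).mpr (List.mem_map.mpr ⟨x, hx, by simpa using hb⟩))
    rw [hstep, ih, insertBy_flatMap e (pvKeys p) (pvGroup p) (pvKeys_pairwise_lt p)
      (fun k _ => pvGroup_key p k)
      (fun k hk => pvGroup_ne_nil p k ((mem_pvKeys p k).mp hk)) hout,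
      pvKeys_append]
    exact List.flatMap_congr (fun k _ => (pvGroup_append p e k).symm)

-- splitting a concatenation of nonempty constant-key groups with strictly
-- increasing keys into runs recovers the groups
lemma pvRuns_flatMap (ks : List Int) (g : Int → List (Int × Int × Int))
    (hks : ks.Pairwise (· < ·))
    (hkey : ∀ k ∈ ks, ∀ y ∈ g k, y.2.2 = k)
    (hne : ∀ k ∈ ks, g k ≠ []) :
    pvRuns (ks.flatMap g) = ks.map g := by
  induction ks with
  | nil => simp [pvRuns]
  | cons a t ih =>
    obtain ⟨hat, ht⟩ := List.pairwise_cons.mp hks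
    obtain ⟨x, xs, hgax⟩ := List.exists_cons_of_ne_nil (hne a List.mem_cons_self)
    have hx : x.2.2 = a := hkey a List.mem_cons_self x (by rw [hgax]; exact List.mem_cons_self)
    have hxs : ∀ y ∈ xs, (y.2.2 == x.2.2) = true := by
      intro y hy
      have := hkey a List.mem_cons_self y (by rw [hgax]; exact List.mem_cons_of_mem _ hy)
      simp [this, hx]
    have hrest : ∀ y ∈ t.flatMap g, (y.2.2 == x.2.2) = false := by
      intro y hy
      obtain ⟨b, hb, hyb⟩ := List.mem_flatMap.mp hy
      have := hkey b (List.mem_cons_of_mem _ hb) y hyb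
      have hab := hat b hb
      simp [this, hx]; omega
    rw [List.flatMap_cons, hgax, List.cons_append, pvRuns]
    have htake : (xs ++ t.flatMap g).takeWhile (fun y => y.2.2 == x.2.2) = xs := by
      rw [List.takeWhile_append_of_pos hxs]
      cases hflat : t.flatMap g with
      | nil => simp
      | cons z zs =>
        rw [List.takeWhile_cons_of_neg]
        · simp
        · have := hrest z (by rw [hflat]; exact List.mem_cons_self)
          simp [this]
    have hdrop : (xs ++ t.flatMap g).dropWhile (fun y => y.2.2 == x.2.2) = t.flatMap g := by
      rw [List.dropWhile_append_of_pos hxs]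
      cases hflat : t.flatMap g with
      | nil => simp
      | cons z zs =>
        rw [List.dropWhile_cons_of_neg]
        have := hrest z (by rw [hflat]; exact List.mem_cons_self)
        simp [this]
    rw [htake, hdrop, ih ht (fun k hk => hkey k (List.mem_cons_of_mem _ hk))
      (fun k hk => hne k (List.mem_cons_of_mem _ hk)), List.map_cons, hgax]

-- ===== VERDICT (by name: the statement is the Claim_ definition above) =====
theorem restructMatrix_spec : Claim_equal_restructMatrix := by
  intro Mat _
  show restructMatrix Mat = restructMatrix_alt Mat
  rw [restructMatrix, restructMatrix_alt]
  have hA : Mat.foldl (fun reMat lista => lista.foldl (fun r e => restructInsert e r) reMat) [] =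
      pvG Mat.flatten := by
    rw [← List.foldl_flatten]
    have h0 : pvG [] = [] := rfl
    simpa [h0] using pvG_foldl Mat.flatten []
  rw [hA, sorted_pvG, sorted_flat,
    pvRuns_flatMap (pvKeys Mat.flatten) (pvGroup Mat.flatten) (pvKeys_pairwise_lt _)
      (fun k hk => pvGroup_key _ k)
      (fun k hk => pvGroup_ne_nil _ k ((mem_pvKeys _ k).mp hk))]
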